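-- pv_equiv track=rewrite | github.com/sametz/aoc2016 | day_11/part1.py | active_floors
-- ===== SOURCE A (Python) =====
-- def occupied_floors(state):
--     doodads = state[:-1]
--     chip_floors = [d[0] for d in doodads]
--     generator_floors = [d[1] for d in doodads]
--     return set(chip_floors + generator_floors)
--
-- def active_floors(state):
--     floors = [1, 2, 3, 4]
--     occupied = occupied_floors(state)
--     remaining_floors = []
--     for i, floor in enumerate(floors):
--         if floor not in occupied:
--             continue
--         else:
--             remaining_floors += floors[i:]
--             break
--     return set(remaining_floors)
-- ===== SOURCE B (Python) =====
-- def active_floors(state):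
--     lowest = 5
--     for doodad in state[:-1]:
--         for floor in (doodad[0], doodad[1]):
--             if 1 <= floor <= 4 and floor < lowest:
--                 lowest = floor
--     return set(range(lowest, 5))
-- ===== Notes on version B (the rewrite author's own statement) =====
-- stated objective: simpler
-- what changed: Instead of building the set of occupied floors and scanning the floor list until the first occupied floor to slice from, B makes a single pass over the doodads tracking the lowest floor that lies in 1..4 and returns set(range(lowest, 5)); no occupied set and no floor scan are built.
import Mathlib
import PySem

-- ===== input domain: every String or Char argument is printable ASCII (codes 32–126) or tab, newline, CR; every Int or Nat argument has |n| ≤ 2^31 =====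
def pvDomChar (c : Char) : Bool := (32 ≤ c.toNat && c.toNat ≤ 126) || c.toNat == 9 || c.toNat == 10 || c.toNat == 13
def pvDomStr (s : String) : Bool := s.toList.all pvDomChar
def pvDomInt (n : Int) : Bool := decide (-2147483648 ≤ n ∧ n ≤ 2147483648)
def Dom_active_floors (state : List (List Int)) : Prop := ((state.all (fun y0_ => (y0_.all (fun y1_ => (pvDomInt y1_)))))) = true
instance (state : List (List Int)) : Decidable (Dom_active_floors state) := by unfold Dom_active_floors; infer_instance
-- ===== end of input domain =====

-- B drops A's occupied-set-then-scan-floors structure: one pass over the doodads tracks the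
-- lowest floor lying in 1..4, then range(lowest, 5) is the answer. Objective: simpler.

-- ===== PORT A =====
-- d[0]/d[1] via pyGet?; the .getD 0 default is never reached inside Pre_ (all doodads have length ≥ 2).
def occupied_floors (state : List (List Int)) : List Int :=
  let doodads := PySem.List.slice state none (some (-1))
  let chip_floors := doodads.map (fun d => (PySem.List.pyGet? d 0).getD 0)
  let generator_floors := doodads.map (fun d => (PySem.List.pyGet? d 1).getD 0)
  PySem.Set.ofList (chip_floors ++ generator_floors)

-- the for-loop of A: scan enumerate(floors); on the first occupied floor append floors[i:] and break
def afLoop (occ : List Int) : List (Int × Int) → List Int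
  | [] => []
  | (i, floor) :: rest =>
    if floor ∈ occ then PySem.List.slice ([1, 2, 3, 4] : List Int) (some i) none
    else afLoop occ rest

def active_floors (state : List (List Int)) : List Int :=
  let floors : List Int := [1, 2, 3, 4]
  let occupied := occupied_floors state
  PySem.Set.ofList (afLoop occupied (PySem.List.enumerate floors 0))

-- ===== PORT B =====
-- the inner 'for floor in (doodad[0], doodad[1])' is the inner foldl over the two-element list
def active_floors_alt (state : List (List Int)) : List Int :=
  let lowest := (PySem.List.slice state none (some (-1))).foldl
    (fun m d =>
      [(PySem.List.pyGet? d 0).getD 0, (PySem.List.pyGet? d 1).getD 0].foldl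
        (fun m v => if 1 ≤ v ∧ v ≤ 4 ∧ v < m then v else m) m) 5
  PySem.Set.ofList (PySem.List.pyRange lowest 5 1)

-- ===== PRECONDITION & SPEC =====
-- Pre_ excludes exactly the inputs on which A raises IndexError: a doodad (any element of
-- state[:-1]) of length < 2 makes d[0] or d[1] raise.
def Pre_active_floors (state : List (List Int)) : Prop :=
  ∀ d ∈ state.dropLast, 2 ≤ d.length
instance (state : List (List Int)) : Decidable (Pre_active_floors state) := by
  unfold Pre_active_floors; infer_instance
def pvWitness_active_floors : List (List Int) := [[2, 1], [3, 3], [0, 0]]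

def Spec_active_floors (state : List (List Int)) (out : List Int) : Prop := out = active_floors_alt state
instance (state : List (List Int)) (out : List Int) : Decidable (Spec_active_floors state out) := by unfold Spec_active_floors; infer_instance

-- ===== CLAIM (what is proved, stated in full; the proofs are below) =====
def Claim_equal_active_floors : Prop := ∀ (state : List (List Int)), Dom_active_floors state → Pre_active_floors state → Spec_active_floors state (active_floors state)

-- ===== LEMMAS AND PROOFS =====

-- B's per-doodad step
def bStep (m : Int) (d : List Int) : Int :=
  [(PySem.List.pyGet? d 0).getD 0, (PySem.List.pyGet? d 1).getD 0].foldl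
    (fun m v => if 1 ≤ v ∧ v ≤ 4 ∧ v < m then v else m) m

def cval (d : List Int) : Int := (PySem.List.pyGet? d 0).getD 0
def gval (d : List Int) : Int := (PySem.List.pyGet? d 1).getD 0

-- characterisation of B's fold: the result is 5 (untouched) or some in-range value of the list,
-- it never grows, and it lower-bounds every in-range value encountered
theorem bFold_char (ds : List (List Int)) (m0 : Int) :
    (ds.foldl bStep m0 = m0 ∨ ((ds.foldl bStep m0 ∈ ds.map cval ∨ ds.foldl bStep m0 ∈ ds.map gval) ∧ 1 ≤ ds.foldl bStep m0 ∧ ds.foldl bStep m0 ≤ 4)) ∧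
    ds.foldl bStep m0 ≤ m0 ∧
    (∀ v, (v ∈ ds.map cval ∨ v ∈ ds.map gval) → 1 ≤ v → v ≤ 4 → ds.foldl bStep m0 ≤ v) := by
  induction ds generalizing m0 with
  | nil => simp
  | cons d t ih =>
    simp only [List.foldl_cons, List.map_cons]
    obtain ⟨h1, h2, h3⟩ := ih (bStep m0 d)
    have hstep : (bStep m0 d = m0 ∨ ((bStep m0 d = cval d ∨ bStep m0 d = gval d) ∧ 1 ≤ bStep m0 d ∧ bStep m0 d ≤ 4)) ∧
        bStep m0 d ≤ m0 ∧ (1 ≤ cval d → cval d ≤ 4 → bStep m0 d ≤ cval d) ∧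
        (1 ≤ gval d → gval d ≤ 4 → bStep m0 d ≤ gval d) := by
      simp only [bStep, cval, gval, List.foldl_cons, List.foldl_nil]
      split_ifs <;> omega
    refine ⟨?_, ?_, ?_⟩
    · rcases h1 with h | ⟨hm, hlo, hhi⟩
      · rw [h]
        rcases hstep.1 with h' | ⟨hm', hlo', hhi'⟩
        · exact Or.inl h'
        · exact Or.inr ⟨by rcases hm' with h'' | h'' <;> simp [h''], hlo', hhi'⟩
      · exact Or.inr ⟨by rcases hm with h'' | h'' <;> simp [h''], hlo, hhi⟩
    · exact le_trans h2 hstep.2.1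
    · intro v hv hlo hhi
      rcases hv with hv | hv
      · rcases List.mem_cons.mp hv with hv | hv
        · exact le_trans h2 (hv ▸ hstep.2.2.1 (hv ▸ hlo) (hv ▸ hhi))
        · exact h3 v (Or.inl hv) hlo hhi
      · rcases List.mem_cons.mp hv with hv | hv
        · exact le_trans h2 (hv ▸ hstep.2.2.2 (hv ▸ hlo) (hv ▸ hhi))
        · exact h3 v (Or.inr hv) hlo hhi

-- ===== VERDICT (by name: the statement is the Claim_ definition above) =====
theorem active_floors_spec : Claim_equal_active_floors := by
  intro state _ _
  unfold Spec_active_floors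
  show active_floors state = active_floors_alt state
  set ds := PySem.List.slice state none (some (-1)) with hds
  obtain ⟨h1, h2, h3⟩ := bFold_char ds 5
  set m := ds.foldl bStep 5 with hm
  set L := ds.map cval ++ ds.map gval with hL
  show PySem.Set.ofList (afLoop (PySem.Set.ofList L) (PySem.List.enumerate ([1, 2, 3, 4] : List Int) 0)) = PySem.Set.ofList (PySem.List.pyRange m 5 1)
  have hmemL : ∀ v : Int, v ∈ L ↔ (v ∈ ds.map cval ∨ v ∈ ds.map gval) := by
    intro v; simp [hL]
  by_cases e1 : (1 : Int) ∈ L <;> by_cases e2 : (2 : Int) ∈ L <;>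
    by_cases e3 : (3 : Int) ∈ L <;> by_cases e4 : (4 : Int) ∈ L <;>
  · -- determine m in this membership case
    have hmv : m = 5 ∨ m = 1 ∨ m = 2 ∨ m = 3 ∨ m = 4 := by
      rcases h1 with h | ⟨_, hlo, hhi⟩
      · exact Or.inl h
      · omega
    have hmem : m ≠ 5 → m ∈ L := by
      intro hne
      rcases h1 with h | ⟨hmm, _, _⟩
      · exact absurd h hne
      · exact (hmemL m).mpr hmm
    first
    | (have : m = 1 := by
        have := h3 1 ((hmemL 1).mp e1) (by norm_num) (by norm_num)
        rcases hmv with h|h|h|h|h <;> omega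
       rw [this]
       simp [PySem.List.enumerate, afLoop, PySem.Set.mem_ofList, e1, e2, e3, e4] <;> decide)
    | (have : m = 2 := by
        have hb := h3 2 ((hmemL 2).mp e2) (by norm_num) (by norm_num)
        have h1' : m ≠ 1 := fun h => e1 (h ▸ hmem (by omega))
        rcases hmv with h|h|h|h|h <;> omega
       rw [this]
       simp [PySem.List.enumerate, afLoop, PySem.Set.mem_ofList, e1, e2, e3, e4] <;> decide)
    | (have : m = 3 := by
        have hb := h3 3 ((hmemL 3).mp e3) (by norm_num) (by norm_num)
        have h1' : m ≠ 1 := fun h => e1 (h ▸ hmem (by omega))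
        have h2' : m ≠ 2 := fun h => e2 (h ▸ hmem (by omega))
        rcases hmv with h|h|h|h|h <;> omega
       rw [this]
       simp [PySem.List.enumerate, afLoop, PySem.Set.mem_ofList, e1, e2, e3, e4] <;> decide)
    | (have : m = 4 := by
        have hb := h3 4 ((hmemL 4).mp e4) (by norm_num) (by norm_num)
        have h1' : m ≠ 1 := fun h => e1 (h ▸ hmem (by omega))
        have h2' : m ≠ 2 := fun h => e2 (h ▸ hmem (by omega))
        have h3' : m ≠ 3 := fun h => e3 (h ▸ hmem (by omega))
        rcases hmv with h|h|h|h|h <;> omega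
       rw [this]
       simp [PySem.List.enumerate, afLoop, PySem.Set.mem_ofList, e1, e2, e3, e4] <;> decide)
    | (have : m = 5 := by
        have h1' : m ≠ 1 := fun h => e1 (h ▸ hmem (by omega))
        have h2' : m ≠ 2 := fun h => e2 (h ▸ hmem (by omega))
        have h3' : m ≠ 3 := fun h => e3 (h ▸ hmem (by omega))
        have h4' : m ≠ 4 := fun h => e4 (h ▸ hmem (by omega))
        rcases hmv with h|h|h|h|h <;> omega
       rw [this]
       simp [PySem.List.enumerate, afLoop, PySem.Set.mem_ofList, e1, e2, e3, e4] <;> decide)
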